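-- pv_equiv track=rewrite | github.com/envyaims/Pantheon-CMIMC-2024 | death-run/student.py | remove_solitary_edges
-- ===== SOURCE A (Python) =====
-- def remove_solitary_edges(edge_list):
--     out_degree = {}
--     out_edges = {}
--     for u, v, w in edge_list:
--         out_edges[u] = out_edges.get(u, list())
--         out_edges[u].append(tuple([v, w]))
--         out_degree[u] = out_degree.get(u, 0) + 1
--         out_degree[v] = out_degree.get(v, 0)
--
--     filtered_edges = []
--     for edge in edge_list:
--         if out_degree[edge[0]] == 2:
--             this_out_edges = out_edges[edge[0]]
--             min_edge = min(this_out_edges, key=lambda x: x[1])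
--             max_edge = max(this_out_edges, key=lambda x: x[1])
--             if min_edge[1] == max_edge[1]:
--                 filtered_edges.append(tuple([edge[0], edge[1], min_edge[1] + 2]))
--             elif min_edge[0] == edge[1]:
--                 filtered_edges.append(tuple([edge[0], edge[1], min(min_edge[1] + 4, max_edge[1])]))
--             elif max_edge[0] == edge[1]:
--                 filtered_edges.append(tuple([edge[0], edge[1], max_edge[1] + 2]))
--         elif out_degree[edge[0]] > 1:
--             filtered_edges.append(edge)
--     return filtered_edges
-- ===== SOURCE B (Python) =====
-- def _new_weight(stat, v, w):
--     # stat = (out-degree of the source, its min-weight out-edge, its max-weight out-edge)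
--     deg, mn, mx = stat
--     if deg == 2:
--         if mn[1] == mx[1]:
--             return mn[1] + 2
--         if mn[0] == v:
--             return min(mn[1] + 4, mx[1])
--         if mx[0] == v:
--             return mx[1] + 2
--         return None
--     return w if deg > 1 else None
--
--
-- def remove_solitary_edges(edge_list):
--     # One pass: per source node keep only (degree, running min edge, running max edge);
--     # strict comparisons reproduce min()/max() first-occurrence tie-breaking.
--     stats = {}
--     for u, v, w in edge_list:
--         if u in stats:
--             deg, mn, mx = stats[u]
--             stats[u] = (deg + 1,
--                         (v, w) if w < mn[1] else mn,
--                         (v, w) if w > mx[1] else mx)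
--         else:
--             stats[u] = (1, (v, w), (v, w))
--     out = []
--     for u, v, w in edge_list:
--         nw = _new_weight(stats[u], v, w)
--         if nw is not None:
--             out.append((u, v, nw))
--     return out
-- ===== Notes on version B (the rewrite author's own statement) =====
-- stated objective: simpler
-- what changed: B replaces A's per-source adjacency lists and second-pass min()/max() scans by a single dict mapping each source to (out-degree, running min-weight edge, running max-weight edge) built in one pass with strict comparisons, and a helper that returns the new weight (or None) per edge.
import Mathlib
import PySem

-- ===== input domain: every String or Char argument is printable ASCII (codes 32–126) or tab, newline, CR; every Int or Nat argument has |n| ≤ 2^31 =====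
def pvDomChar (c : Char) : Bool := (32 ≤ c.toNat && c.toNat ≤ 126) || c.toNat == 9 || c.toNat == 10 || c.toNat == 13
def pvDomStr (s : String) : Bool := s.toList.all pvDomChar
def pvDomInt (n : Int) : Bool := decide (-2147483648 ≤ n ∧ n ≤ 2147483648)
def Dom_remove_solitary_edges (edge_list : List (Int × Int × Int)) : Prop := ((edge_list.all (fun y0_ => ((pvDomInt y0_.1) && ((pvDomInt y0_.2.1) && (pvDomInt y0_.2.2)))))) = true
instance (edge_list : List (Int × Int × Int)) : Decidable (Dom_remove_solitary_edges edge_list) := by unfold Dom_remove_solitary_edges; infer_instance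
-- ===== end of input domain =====

-- B replaces A's adjacency lists + second-pass min()/max() scans by one dict of per-source
-- (degree, running min edge, running max edge); objective: simpler (no speed claim).

-- ===== PORT A =====
-- first loop of A: build out_degree and out_edges (two dicts), one edge at a time
def pvStepDictsA (st : PySem.Dict Int Int × PySem.Dict Int (List (Int × Int)))
    (e : Int × Int × Int) : PySem.Dict Int Int × PySem.Dict Int (List (Int × Int)) :=
  let u := e.1; let v := e.2.1; let w := e.2.2
  let out_edges := st.2.insert u (st.2.getD u [])
  let out_edges := out_edges.insert u (out_edges.getD u [] ++ [(v, w)])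
  let out_degree := st.1.insert u (st.1.getD u 0 + 1)
  let out_degree := out_degree.insert v (out_degree.getD v 0)
  (out_degree, out_edges)

-- second loop of A: one iteration of the filtering loop
def pvEmitA (out_degree : PySem.Dict Int Int) (out_edges : PySem.Dict Int (List (Int × Int)))
    (filtered_edges : List (Int × Int × Int)) (edge : Int × Int × Int) : List (Int × Int × Int) :=
  if out_degree.getD edge.1 0 = 2 then
    let this_out_edges := out_edges.getD edge.1 []
    -- this_out_edges is nonempty whenever this branch runs, so the `.getD (0, 0)` defaults
    -- (totalising Python's min/max of a nonempty list) are never used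
    let min_edge := (PySem.List.min? this_out_edges (fun x => x.2)).getD (0, 0)
    let max_edge := (PySem.List.max? this_out_edges (fun x => x.2)).getD (0, 0)
    if min_edge.2 = max_edge.2 then
      filtered_edges ++ [(edge.1, edge.2.1, min_edge.2 + 2)]
    else if min_edge.1 = edge.2.1 then
      filtered_edges ++ [(edge.1, edge.2.1, min (min_edge.2 + 4) max_edge.2)]
    else if max_edge.1 = edge.2.1 then
      filtered_edges ++ [(edge.1, edge.2.1, max_edge.2 + 2)]
    else filtered_edges
  else if 1 < out_degree.getD edge.1 0 then
    filtered_edges ++ [edge]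
  else filtered_edges

def remove_solitary_edges (edge_list : List (Int × Int × Int)) : List (Int × Int × Int) :=
  let st := edge_list.foldl pvStepDictsA (PySem.Dict.empty, PySem.Dict.empty)
  edge_list.foldl (pvEmitA st.1 st.2) []

-- ===== PORT B =====
-- first loop of B: per source keep (degree, running min-weight edge, running max-weight edge)
def pvStatStepB (stats : PySem.Dict Int (Int × (Int × Int) × (Int × Int)))
    (e : Int × Int × Int) : PySem.Dict Int (Int × (Int × Int) × (Int × Int)) :=
  match stats.get? e.1 with
  | some s =>
      stats.insert e.1 (s.1 + 1,
        (if e.2.2 < s.2.1.2 then (e.2.1, e.2.2) else s.2.1),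
        (if s.2.2.2 < e.2.2 then (e.2.1, e.2.2) else s.2.2))
  | none => stats.insert e.1 (1, (e.2.1, e.2.2), (e.2.1, e.2.2))

-- B's helper _new_weight
def pvNewWeightB (stat : Int × (Int × Int) × (Int × Int)) (v w : Int) : Option Int :=
  if stat.1 = 2 then
    if stat.2.1.2 = stat.2.2.2 then some (stat.2.1.2 + 2)
    else if stat.2.1.1 = v then some (min (stat.2.1.2 + 4) stat.2.2.2)
    else if stat.2.2.1 = v then some (stat.2.2.2 + 2)
    else none
  else if 1 < stat.1 then some w else none

def remove_solitary_edges_alt (edge_list : List (Int × Int × Int)) : List (Int × Int × Int) :=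
  let stats := edge_list.foldl pvStatStepB PySem.Dict.empty
  edge_list.foldl (fun out e =>
    -- stats[e.1] always exists (e.1 was a source in the first pass); the default is never used
    match pvNewWeightB (stats.getD e.1 (0, (0, 0), (0, 0))) e.2.1 e.2.2 with
    | some nw => out ++ [(e.1, e.2.1, nw)]
    | none => out) []

-- ===== PRECONDITION & SPEC =====
def Spec_remove_solitary_edges (edge_list : List (Int × Int × Int)) (out : List (Int × Int × Int)) : Prop := out = remove_solitary_edges_alt edge_list
instance (edge_list : List (Int × Int × Int)) (out : List (Int × Int × Int)) : Decidable (Spec_remove_solitary_edges edge_list out) := by unfold Spec_remove_solitary_edges; infer_instance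

-- ===== CLAIM (what is proved, stated in full; the proofs are below) =====
def Claim_equal_remove_solitary_edges : Prop := ∀ (edge_list : List (Int × Int × Int)), Dom_remove_solitary_edges edge_list → Spec_remove_solitary_edges edge_list (remove_solitary_edges edge_list)

-- ===== LEMMAS AND PROOFS =====

-- relation between A's two dicts and B's one dict, key by key
def pvRel (deg : PySem.Dict Int Int) (adj : PySem.Dict Int (List (Int × Int)))
    (stB : PySem.Dict Int (Int × (Int × Int) × (Int × Int))) : Prop :=
  ∀ u : Int,
    match stB.get? u with
    | none => adj.get? u = none ∧ (deg.get? u = none ∨ deg.get? u = some 0)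
    | some s => ∃ es, adj.get? u = some es ∧ deg.get? u = some s.1 ∧ s.1 = (es.length : Int) ∧
        PySem.List.min? es (fun x => x.2) = some s.2.1 ∧
        PySem.List.max? es (fun x => x.2) = some s.2.2

lemma pvMin?_append (es : List (Int × Int)) (x mn : Int × Int)
    (h : PySem.List.min? es (fun y => y.2) = some mn) :
    PySem.List.min? (es ++ [x]) (fun y => y.2) = some (if x.2 < mn.2 then x else mn) := by
  unfold PySem.List.min? at h ⊢
  rw [List.foldl_append, h]
  simp only [List.foldl_cons, List.foldl_nil]
  split_ifs with hc <;> simp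

lemma pvMax?_append (es : List (Int × Int)) (x mx : Int × Int)
    (h : PySem.List.max? es (fun y => y.2) = some mx) :
    PySem.List.max? (es ++ [x]) (fun y => y.2) = some (if mx.2 < x.2 then x else mx) := by
  unfold PySem.List.max? at h ⊢
  rw [List.foldl_append, h]
  simp only [List.foldl_cons, List.foldl_nil]
  split_ifs with hc <;> simp

lemma pvStepA_simp (deg : PySem.Dict Int Int) (adj : PySem.Dict Int (List (Int × Int)))
    (a b c : Int) :
    pvStepDictsA (deg, adj) (a, b, c) =
      ((deg.insert a (deg.getD a 0 + 1)).insert b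
          ((deg.insert a (deg.getD a 0 + 1)).getD b 0),
        adj.insert a (adj.getD a [] ++ [(b, c)])) := by
  simp [pvStepDictsA, PySem.Dict.getD_insert_self, PySem.Dict.insert_insert_self]

lemma pvRel_step (deg : PySem.Dict Int Int) (adj : PySem.Dict Int (List (Int × Int)))
    (stB : PySem.Dict Int (Int × (Int × Int) × (Int × Int))) (e : Int × Int × Int)
    (h : pvRel deg adj stB) :
    pvRel (pvStepDictsA (deg, adj) e).1 (pvStepDictsA (deg, adj) e).2 (pvStatStepB stB e) := by
  obtain ⟨a, b, c⟩ := e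
  intro u
  have hu := h u
  have ha := h a
  rw [pvStepA_simp]
  by_cases hua : u = a
  · subst hua
    unfold pvStatStepB
    cases hba : stB.get? u with
    | none =>
        rw [hba] at ha
        obtain ⟨hadj, hdeg⟩ := ha
        have hgadj : adj.getD u [] = [] := PySem.Dict.getD_of_get?_eq_none _ _ hadj
        have hgdeg : deg.getD u 0 = 0 := by
          rcases hdeg with h0 | h0
          · exact PySem.Dict.getD_of_get?_eq_none _ _ h0
          · exact PySem.Dict.getD_of_get?_eq_some _ _ h0
        simp only [PySem.Dict.get?_insert_self]
        refine ⟨[(b, c)], ?_, ?_, by simp, by simp [PySem.List.min?], by simp [PySem.List.max?]⟩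
        · simp [hgadj]
        · by_cases hub : u = b
          · subst hub
            simp [PySem.Dict.getD_insert_self, hgdeg]
          · simp [PySem.Dict.get?_insert, hub, hgdeg]
    | some s =>
        rw [hba] at ha
        obtain ⟨es, hadj, hdeg, hlen, hmin, hmax⟩ := ha
        have hgadj : adj.getD u [] = es := PySem.Dict.getD_of_get?_eq_some _ _ hadj
        have hgdeg : deg.getD u 0 = s.1 := PySem.Dict.getD_of_get?_eq_some _ _ hdeg
        simp only [PySem.Dict.get?_insert_self]
        refine ⟨es ++ [(b, c)], ?_, ?_, ?_, ?_, ?_⟩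
        · simp [hgadj]
        · by_cases hub : u = b
          · subst hub
            simp [PySem.Dict.getD_insert_self, hgdeg]
          · simp [PySem.Dict.get?_insert, hub, hgdeg]
        · simp only [List.length_append, List.length_cons, List.length_nil]
          push_cast
          omega
        · exact pvMin?_append es (b, c) s.2.1 hmin
        · exact pvMax?_append es (b, c) s.2.2 hmax
  · -- u ≠ a: B's entry at u is unchanged; A's adj at u unchanged; deg may gain `some 0` at u = b
    unfold pvStatStepB
    have hBu : (match stB.get? a with
        | some s => stB.insert a (s.1 + 1,
            (if c < s.2.1.2 then (b, c) else s.2.1),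
            (if s.2.2.2 < c then (b, c) else s.2.2))
        | none => stB.insert a (1, (b, c), (b, c))).get? u = stB.get? u := by
      cases stB.get? a <;> exact PySem.Dict.get?_insert_of_ne _ _ hua
    simp only []
    rw [hBu]
    have hadjU : (adj.insert a (adj.getD a [] ++ [(b, c)])).get? u = adj.get? u :=
      PySem.Dict.get?_insert_of_ne _ _ hua
    have hdeg1 : (deg.insert a (deg.getD a 0 + 1)).get? u = deg.get? u :=
      PySem.Dict.get?_insert_of_ne _ _ hua
    by_cases hub : u = b
    · subst hub
      cases hbu : stB.get? u with
      | none =>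
          rw [hbu] at hu
          obtain ⟨hadj, hdeg⟩ := hu
          refine ⟨by rwa [hadjU], ?_⟩
          right
          rw [PySem.Dict.get?_insert_self]
          congr 1
          rcases hdeg with h0 | h0
          · rw [PySem.Dict.getD_of_get?_eq_none _ _ (by rwa [hdeg1])]
          · rw [PySem.Dict.getD_of_get?_eq_some _ _ (by rwa [hdeg1])]
      | some s =>
          rw [hbu] at hu
          obtain ⟨es, hadj, hdeg, hlen, hmin, hmax⟩ := hu
          refine ⟨es, by rwa [hadjU], ?_, hlen, hmin, hmax⟩
          rw [PySem.Dict.get?_insert_self,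
            PySem.Dict.getD_of_get?_eq_some _ _
              (by rwa [hdeg1] : (deg.insert a (deg.getD a 0 + 1)).get? u = some s.1)]
    · have hdeg2 : ((deg.insert a (deg.getD a 0 + 1)).insert b
          ((deg.insert a (deg.getD a 0 + 1)).getD b 0)).get? u = deg.get? u := by
        rw [PySem.Dict.get?_insert_of_ne _ _ hub, hdeg1]
      cases hbu : stB.get? u with
      | none =>
          rw [hbu] at hu
          exact ⟨by rw [hadjU]; exact hu.1, by rw [hdeg2]; exact hu.2⟩
      | some s =>
          rw [hbu] at hu
          obtain ⟨es, hadj, hdeg, rest⟩ := hu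
          exact ⟨es, by rwa [hadjU], by rwa [hdeg2], rest⟩

lemma pvRel_fold (l : List (Int × Int × Int)) :
    ∀ (deg : PySem.Dict Int Int) (adj : PySem.Dict Int (List (Int × Int)))
      (stB : PySem.Dict Int (Int × (Int × Int) × (Int × Int))),
      pvRel deg adj stB →
      pvRel (l.foldl pvStepDictsA (deg, adj)).1 (l.foldl pvStepDictsA (deg, adj)).2
        (l.foldl pvStatStepB stB) := by
  induction l with
  | nil => intro deg adj stB h; exact h
  | cons x t ih =>
      intro deg adj stB h
      have h' := pvRel_step deg adj stB x h
      simpa [List.foldl_cons] using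
        ih (pvStepDictsA (deg, adj) x).1 (pvStepDictsA (deg, adj) x).2 (pvStatStepB stB x) h'

lemma pvRel_empty : pvRel PySem.Dict.empty PySem.Dict.empty PySem.Dict.empty := by
  intro u; simp [PySem.Dict.get?_empty]

lemma pvB_isSome_step (stB : PySem.Dict Int (Int × (Int × Int) × (Int × Int)))
    (e : Int × Int × Int) (k : Int) (h : (stB.get? k).isSome) :
    ((pvStatStepB stB e).get? k).isSome := by
  by_cases hk : k = e.1
  · subst hk
    cases hh : stB.get? e.1 with
    | none => simp [pvStatStepB, hh, PySem.Dict.get?_insert_self]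
    | some s => simp [pvStatStepB, hh, PySem.Dict.get?_insert_self]
  · cases hh : stB.get? e.1 with
    | none => simpa [pvStatStepB, hh, PySem.Dict.get?_insert_of_ne _ _ hk] using h
    | some s => simpa [pvStatStepB, hh, PySem.Dict.get?_insert_of_ne _ _ hk] using h

lemma pvB_isSome_self (stB : PySem.Dict Int (Int × (Int × Int) × (Int × Int)))
    (e : Int × Int × Int) : ((pvStatStepB stB e).get? e.1).isSome := by
  cases hh : stB.get? e.1 with
  | none => simp [pvStatStepB, hh, PySem.Dict.get?_insert_self]
  | some s => simp [pvStatStepB, hh, PySem.Dict.get?_insert_self]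

lemma pvB_isSome_fold (l : List (Int × Int × Int)) :
    ∀ (stB : PySem.Dict Int (Int × (Int × Int) × (Int × Int))) (k : Int),
      (stB.get? k).isSome → ((l.foldl pvStatStepB stB).get? k).isSome := by
  induction l with
  | nil => intro stB k h; exact h
  | cons x t ih => intro stB k h; exact ih _ k (pvB_isSome_step stB x k h)

lemma pvB_presence (l : List (Int × Int × Int)) :
    ∀ (stB : PySem.Dict Int (Int × (Int × Int) × (Int × Int))) (e : Int × Int × Int),
      e ∈ l → ((l.foldl pvStatStepB stB).get? e.1).isSome := by
  induction l with
  | nil => intro _ _ h; cases h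
  | cons x t ih =>
      intro stB e he
      rcases List.mem_cons.mp he with rfl | he
      · exact pvB_isSome_fold t _ e.1 (pvB_isSome_self stB e)
      · exact ih _ e he

lemma pvEmit_agree (deg : PySem.Dict Int Int) (adj : PySem.Dict Int (List (Int × Int)))
    (stB : PySem.Dict Int (Int × (Int × Int) × (Int × Int)))
    (h : pvRel deg adj stB) (e : Int × Int × Int) (hp : (stB.get? e.1).isSome)
    (acc : List (Int × Int × Int)) :
    pvEmitA deg adj acc e =
      (match pvNewWeightB (stB.getD e.1 (0, (0, 0), (0, 0))) e.2.1 e.2.2 with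
       | some nw => acc ++ [(e.1, e.2.1, nw)]
       | none => acc) := by
  obtain ⟨s, hs⟩ := Option.isSome_iff_exists.mp hp
  have hu := h e.1
  rw [hs] at hu
  obtain ⟨es, hadj, hdeg, hlen, hmin, hmax⟩ := hu
  have hgB : stB.getD e.1 (0, (0, 0), (0, 0)) = s := PySem.Dict.getD_of_get?_eq_some _ _ hs
  have hgdeg : deg.getD e.1 0 = s.1 := PySem.Dict.getD_of_get?_eq_some _ _ hdeg
  have hgadj : adj.getD e.1 [] = es := PySem.Dict.getD_of_get?_eq_some _ _ hadj
  unfold pvEmitA pvNewWeightB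
  rw [hgB, hgdeg, hgadj]
  simp only [hmin, hmax, Option.getD_some]
  split_ifs <;> simp

-- ===== VERDICT (by name: the statement is the Claim_ definition above) =====
theorem remove_solitary_edges_spec : Claim_equal_remove_solitary_edges := by
  intro edge_list _
  unfold Spec_remove_solitary_edges remove_solitary_edges remove_solitary_edges_alt
  have hrel := pvRel_fold edge_list PySem.Dict.empty PySem.Dict.empty PySem.Dict.empty pvRel_empty
  apply Eq.symm
  apply PySem.List.foldl_congr_mem
  intro acc e he
  exact (pvEmit_agree _ _ _ hrel e (pvB_presence edge_list PySem.Dict.empty e he) acc).symm
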